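-- pv_equiv track=rewrite | github.com/chrisk60331/mp3_splitter | track_splitter.py | consolidate_short_tracks
-- ===== SOURCE A (Python) =====
-- def consolidate_short_tracks(tracks, min_duration):
--     consolidated_tracks = []
--     i = 0
--     while i < len(tracks):
--         start, end = tracks[i]
--         duration = end - start
--
--         if duration >= min_duration:
--             consolidated_tracks.append((start, end))
--             i += 1
--         else:
--             # Merge with the next track(s) until duration is sufficient
--             merge_end = end
--             while duration < min_duration and i + 1 < len(tracks):
--                 i += 1
--                 merge_end = tracks[i][1]
--                 duration = merge_end - start
--             # If still too short and there is a previous track, merge with it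
--             if duration < min_duration and consolidated_tracks:
--                 prev_start, _ = consolidated_tracks[-1]
--                 consolidated_tracks[-1] = (prev_start, merge_end)
--             else:
--                 consolidated_tracks.append((start, merge_end))
--             i += 1
--     return consolidated_tracks
-- ===== SOURCE B (Python) =====
-- def consolidate_short_tracks(tracks, min_duration):
--     # Stage 1: find the cut points (indices where a new group starts).
--     cuts = []
--     s = None
--     for j, (a, b) in enumerate(tracks):
--         if s is None:
--             cuts.append(j)
--             s = a
--         if b - s >= min_duration:
--             s = None
--     # Stage 2: materialise one segment per pair of consecutive cuts.
--     segs = [(tracks[c][0], tracks[d - 1][1])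
--             for c, d in zip(cuts, cuts[1:] + [len(tracks)])]
--     # Stage 3: a trailing group that never reached min_duration merges backward.
--     if s is not None and len(segs) >= 2:
--         segs[-2:] = [(segs[-2][0], segs[-1][1])]
--     return segs
-- ===== Notes on version B (the rewrite author's own statement) =====
-- stated objective: alternative
-- what changed: Instead of A's nested index-while that accumulates merged segments directly, B runs three staged passes: a scan over enumerate(tracks) that records only the cut indices where each group starts (plus whether the last group stayed short), a zip of consecutive cut pairs that materialises the segments, and a final backward-merge fix-up of a trailing short group.
import Mathlib
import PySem

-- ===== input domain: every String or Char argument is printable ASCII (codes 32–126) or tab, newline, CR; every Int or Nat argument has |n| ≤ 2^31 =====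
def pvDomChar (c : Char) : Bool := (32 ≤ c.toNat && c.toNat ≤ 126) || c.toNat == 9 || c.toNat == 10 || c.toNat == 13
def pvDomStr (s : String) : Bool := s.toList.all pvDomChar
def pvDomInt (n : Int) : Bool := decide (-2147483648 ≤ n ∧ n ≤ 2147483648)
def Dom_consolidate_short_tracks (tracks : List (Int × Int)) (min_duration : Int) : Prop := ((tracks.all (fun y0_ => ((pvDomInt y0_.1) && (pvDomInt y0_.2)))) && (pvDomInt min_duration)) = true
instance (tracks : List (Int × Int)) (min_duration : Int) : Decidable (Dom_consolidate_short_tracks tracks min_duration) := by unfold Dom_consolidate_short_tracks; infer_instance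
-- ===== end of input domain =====

-- B replaces A's nested index-while loops by three staged passes: a cut-index
-- scan over enumerate(tracks), a zip of consecutive cuts building the segments,
-- and a trailing backward-merge fix-up (alternative decomposition, same cost).


-- ===== PORT A =====
-- inner `while duration < min_duration and i + 1 < len(tracks)` loop of A;
-- returns the final (i, merge_end, duration).  The fuel argument only makes the
-- recursion structural (every call supplies fuel ≥ the iterations the while
-- performs, so the fuel-0 case is never the exit taken by Python's loop).
-- tracks[i+1] is in range when read (guarded by the loop condition), so getD is exact.
def pvInnerA (tracks : List (Int × Int)) (min_duration start : Int) :
    Nat → Nat → Int → Int → Nat × Int × Int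
  | 0, i, merge_end, duration => (i, merge_end, duration)
  | fuel+1, i, merge_end, duration =>
    if duration < min_duration ∧ i + 1 < tracks.length then
      pvInnerA tracks min_duration start fuel (i+1) (tracks.getD (i+1) (0,0)).2
        ((tracks.getD (i+1) (0,0)).2 - start)
    else (i, merge_end, duration)

-- outer `while i < len(tracks)` loop of A, accumulator = consolidated_tracks;
-- fuel as above (one unit per outer iteration, tracks.length is always enough).
-- tracks[i] is in range (loop guard) and consolidated_tracks[-1] is only read
-- under `consolidated_tracks` (nonempty), so getD/getLastD are exact.
def pvOuterA (tracks : List (Int × Int)) (min_duration : Int) :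
    Nat → Nat → List (Int × Int) → List (Int × Int)
  | 0, _, acc => acc
  | fuel+1, i, acc =>
    if i < tracks.length then
      let t := tracks.getD i (0,0)
      if t.2 - t.1 ≥ min_duration then
        pvOuterA tracks min_duration fuel (i+1) (acc ++ [(t.1, t.2)])
      else
        let r := pvInnerA tracks min_duration t.1 tracks.length i t.2 (t.2 - t.1)
        if r.2.2 < min_duration ∧ acc ≠ [] then
          pvOuterA tracks min_duration fuel (r.1+1) (acc.dropLast ++ [((acc.getLastD (0,0)).1, r.2.1)])
        else
          pvOuterA tracks min_duration fuel (r.1+1) (acc ++ [(t.1, r.2.1)])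
    else acc

def consolidate_short_tracks (tracks : List (Int × Int)) (min_duration : Int) : List (Int × Int) :=
  pvOuterA tracks min_duration tracks.length 0 []

-- ===== PORT B =====
-- Stage 1 of B: `for j, (a, b) in enumerate(tracks)` maintaining (cuts, s);
-- cuts records the index starting each group, s the open group's start (or none).
def pvCutsB (min_duration : Int) :
    List (Int × (Int × Int)) → List Int → Option Int → List Int × Option Int
  | [], cuts, s => (cuts, s)
  | (j, t) :: rest, cuts, s =>
    let p := match s with
      | none => (cuts ++ [j], t.1)
      | some sv => (cuts, sv)
    pvCutsB min_duration rest p.1 (if t.2 - p.2 ≥ min_duration then none else some p.2)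

-- Stage 2 of B: the list comprehension over zip(cuts, cuts[1:] + [len(tracks)]);
-- every index it reads is a cut (≥ 0, < len) or a successor cut − 1, so in range.
def pvSegsB (tracks : List (Int × Int)) (cuts : List Int) : List (Int × Int) :=
  (cuts.zip (cuts.drop 1 ++ [(tracks.length : Int)])).map
    (fun cd => ((PySem.List.pyGetD tracks cd.1 (0,0)).1,
                (PySem.List.pyGetD tracks (cd.2 - 1) (0,0)).2))

-- Stage 3 of B: `segs[-2:] = [(segs[-2][0], segs[-1][1])]` under the guard.
def consolidate_short_tracks_alt (tracks : List (Int × Int)) (min_duration : Int) : List (Int × Int) :=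
  let r := pvCutsB min_duration (PySem.List.enumerate tracks) [] none
  let segs := pvSegsB tracks r.1
  if r.2 ≠ none ∧ segs.length ≥ 2 then
    segs.take (segs.length - 2) ++
      [((PySem.List.pyGetD segs (-2) (0,0)).1, (PySem.List.pyGetD segs (-1) (0,0)).2)]
  else segs

-- ===== PRECONDITION & SPEC =====
def Spec_consolidate_short_tracks (tracks : List (Int × Int)) (min_duration : Int) (out : List (Int × Int)) : Prop := out = consolidate_short_tracks_alt tracks min_duration
instance (tracks : List (Int × Int)) (min_duration : Int) (out : List (Int × Int)) : Decidable (Spec_consolidate_short_tracks tracks min_duration out) := by unfold Spec_consolidate_short_tracks; infer_instance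

-- ===== CLAIM (what is proved, stated in full; the proofs are below) =====
def Claim_equal_consolidate_short_tracks : Prop := ∀ (tracks : List (Int × Int)) (min_duration : Int), Dom_consolidate_short_tracks tracks min_duration → Spec_consolidate_short_tracks tracks min_duration (consolidate_short_tracks tracks min_duration)

-- ===== LEMMAS AND PROOFS =====

-- proof intermediate: a single flat pass with an open buffer; A's outer loop is
-- proved equal to it (outer_eq_goB) and it is proved equal to B's staged passes
-- (goB_state), which yields the claim.
def pvGoB (min_duration : Int) :
    List (Int × Int) → Option (Int × Int) → List (Int × Int) → List (Int × Int)
  | [], none, acc => acc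
  | [], some c, acc =>
      if acc ≠ [] then acc.dropLast ++ [((acc.getLastD (0,0)).1, c.2)]
      else acc ++ [c]
  | t :: rest, cur, acc =>
      let c := match cur with
        | none => t
        | some c0 => (c0.1, t.2)
      if c.2 - c.1 ≥ min_duration then pvGoB min_duration rest none (acc ++ [c])
      else pvGoB min_duration rest (some c) acc

-- unfolding equations (all definitional)
theorem pvInnerA_succ (tracks : List (Int × Int)) (m s : Int) (k i : Nat) (me d : Int) :
    pvInnerA tracks m s (k+1) i me d =
      if d < m ∧ i + 1 < tracks.length then
        pvInnerA tracks m s k (i+1) (tracks.getD (i+1) (0,0)).2 ((tracks.getD (i+1) (0,0)).2 - s)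
      else (i, me, d) := rfl

theorem pvOuterA_succ (tracks : List (Int × Int)) (m : Int) (k i : Nat) (acc : List (Int × Int)) :
    pvOuterA tracks m (k+1) i acc =
      if i < tracks.length then
        (if (tracks.getD i (0,0)).2 - (tracks.getD i (0,0)).1 ≥ m then
          pvOuterA tracks m k (i+1) (acc ++ [((tracks.getD i (0,0)).1, (tracks.getD i (0,0)).2)])
        else
          if (pvInnerA tracks m (tracks.getD i (0,0)).1 tracks.length i (tracks.getD i (0,0)).2
                ((tracks.getD i (0,0)).2 - (tracks.getD i (0,0)).1)).2.2 < m ∧ acc ≠ [] then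
            pvOuterA tracks m k
              ((pvInnerA tracks m (tracks.getD i (0,0)).1 tracks.length i (tracks.getD i (0,0)).2
                  ((tracks.getD i (0,0)).2 - (tracks.getD i (0,0)).1)).1 + 1)
              (acc.dropLast ++ [((acc.getLastD (0,0)).1,
                (pvInnerA tracks m (tracks.getD i (0,0)).1 tracks.length i (tracks.getD i (0,0)).2
                  ((tracks.getD i (0,0)).2 - (tracks.getD i (0,0)).1)).2.1)])
          else
            pvOuterA tracks m k
              ((pvInnerA tracks m (tracks.getD i (0,0)).1 tracks.length i (tracks.getD i (0,0)).2
                  ((tracks.getD i (0,0)).2 - (tracks.getD i (0,0)).1)).1 + 1)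
              (acc ++ [((tracks.getD i (0,0)).1,
                (pvInnerA tracks m (tracks.getD i (0,0)).1 tracks.length i (tracks.getD i (0,0)).2
                  ((tracks.getD i (0,0)).2 - (tracks.getD i (0,0)).1)).2.1)]))
      else acc := rfl

theorem pvGoB_nil_none (m : Int) (acc : List (Int × Int)) : pvGoB m [] none acc = acc := rfl

theorem pvGoB_nil_some (m : Int) (c : Int × Int) (acc : List (Int × Int)) :
    pvGoB m [] (some c) acc =
      if acc ≠ [] then acc.dropLast ++ [((acc.getLastD (0,0)).1, c.2)] else acc ++ [c] := rfl

theorem pvGoB_cons_none (m : Int) (t : Int × Int) (rest acc : List (Int × Int)) :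
    pvGoB m (t :: rest) none acc =
      if t.2 - t.1 ≥ m then pvGoB m rest none (acc ++ [t]) else pvGoB m rest (some t) acc := rfl

theorem pvGoB_cons_some (m : Int) (t : Int × Int) (rest : List (Int × Int)) (s me : Int)
    (acc : List (Int × Int)) :
    pvGoB m (t :: rest) (some (s, me)) acc =
      if t.2 - s ≥ m then pvGoB m rest none (acc ++ [(s, t.2)])
      else pvGoB m rest (some (s, t.2)) acc := rfl

-- for any fuel, the inner loop with a false guard returns its state unchanged
theorem pvInnerA_stop (tracks : List (Int × Int)) (m s : Int) (k i : Nat) (me d : Int)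
    (h : ¬ (d < m ∧ i + 1 < tracks.length)) : pvInnerA tracks m s k i me d = (i, me, d) := by
  cases k with
  | zero => rfl
  | succ k => rw [pvInnerA_succ, if_neg h]

-- the inner loop never moves i backward
theorem pvInnerA_ge (tracks : List (Int × Int)) (m s : Int) :
    ∀ (k i : Nat) (me d : Int), i ≤ (pvInnerA tracks m s k i me d).1 := by
  intro k
  induction k with
  | zero => intro i me d; exact le_refl i
  | succ k ih =>
    intro i me d
    rw [pvInnerA_succ]
    by_cases h : d < m ∧ i + 1 < tracks.length
    · rw [if_pos h]
      exact le_trans (by omega) (ih (i+1) _ _)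
    · rw [if_neg h]

-- when the inner loop exits with duration still short, it has consumed the tail
theorem pvInnerA_exit (tracks : List (Int × Int)) (m s : Int) :
    ∀ (k i : Nat) (me d : Int), tracks.length - i ≤ k →
      (pvInnerA tracks m s k i me d).2.2 < m →
      tracks.length ≤ (pvInnerA tracks m s k i me d).1 + 1 := by
  intro k
  induction k with
  | zero => intro i me d hk _; show tracks.length ≤ i + 1; omega
  | succ k ih =>
    intro i me d hk
    rw [pvInnerA_succ]
    by_cases h : d < m ∧ i + 1 < tracks.length
    · rw [if_pos h]
      exact ih (i+1) _ _ (by omega)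
    · rw [if_neg h]
      intro hd
      simp only [not_and, not_lt] at h
      have := h hd
      omega

-- A's handling of the inner-loop result (the branch after the inner while)
def pvInnerCont (tracks : List (Int × Int)) (m s : Int) (acc : List (Int × Int))
    (r : Nat × Int × Int) : List (Int × Int) :=
  if r.2.2 < m then
    (if acc ≠ [] then acc.dropLast ++ [((acc.getLastD (0,0)).1, r.2.1)] else acc ++ [(s, r.2.1)])
  else pvGoB m (tracks.drop (r.1+1)) none (acc ++ [(s, r.2.1)])

-- bridge: the flat pass with an open short buffer (s, me) over the tail `drop (i+1)`
-- computes exactly what A's inner loop plus A's post-inner handling compute.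
theorem goB_inner (tracks : List (Int × Int)) (m : Int) :
    ∀ (k i : Nat) (s me : Int) (acc : List (Int × Int)),
      tracks.length - i ≤ k → i < tracks.length → me - s < m →
      pvGoB m (tracks.drop (i+1)) (some (s, me)) acc =
        pvInnerCont tracks m s acc (pvInnerA tracks m s k i me (me - s)) := by
  intro k
  induction k with
  | zero => intro i s me acc hk hi; omega
  | succ k ih =>
    intro i s me acc hk hi hshort
    rw [pvInnerA_succ]
    by_cases h2 : i + 1 < tracks.length
    · rw [if_pos ⟨hshort, h2⟩]
      have hdrop : tracks.drop (i+1) = tracks.getD (i+1) (0,0) :: tracks.drop (i+1+1) := by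
        rw [List.getD_eq_getElem _ _ h2, List.drop_eq_getElem_cons h2]
      set t := tracks.getD (i+1) (0,0) with ht
      rw [hdrop, pvGoB_cons_some]
      by_cases hlong : t.2 - s ≥ m
      · rw [if_pos hlong, pvInnerA_stop tracks m s k (i+1) t.2 (t.2 - s) (by omega)]
        simp only [pvInnerCont]
        rw [if_neg (show ¬ ((i+1, t.2, t.2 - s) : Nat × Int × Int).2.2 < m by simpa using by omega)]
      · rw [if_neg hlong]
        exact ih (i+1) s t.2 acc (by omega) h2 (by omega)
    · rw [if_neg (by omega : ¬ (me - s < m ∧ i + 1 < tracks.length))]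
      rw [List.drop_eq_nil_of_le (by omega : tracks.length ≤ i + 1), pvGoB_nil_some]
      simp only [pvInnerCont]
      rw [if_pos (show ((i, me, me - s) : Nat × Int × Int).2.2 < m by simpa using hshort)]

-- invariant: A's outer loop from index i with a closed buffer equals
-- the flat pass over the remaining tracks with no open buffer.
theorem outer_eq_goB (tracks : List (Int × Int)) (m : Int) :
    ∀ (k i : Nat) (acc : List (Int × Int)), tracks.length - i ≤ k →
      pvOuterA tracks m k i acc = pvGoB m (tracks.drop i) none acc := by
  intro k
  induction k with
  | zero =>
    intro i acc hk
    rw [List.drop_eq_nil_of_le (by omega), pvGoB_nil_none]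
    rfl
  | succ k ih =>
    intro i acc hk
    by_cases hi : i < tracks.length
    · have hdrop : tracks.drop i = tracks.getD i (0,0) :: tracks.drop (i+1) := by
        rw [List.getD_eq_getElem _ _ hi, List.drop_eq_getElem_cons hi]
      rw [pvOuterA_succ, if_pos hi, hdrop, pvGoB_cons_none]
      set t := tracks.getD i (0,0) with ht
      by_cases hlong : t.2 - t.1 ≥ m
      · rw [if_pos hlong, if_pos hlong, ih (i+1) (acc ++ [(t.1, t.2)]) (by omega)]
      · rw [if_neg hlong, if_neg hlong]
        rw [goB_inner tracks m tracks.length i t.1 t.2 acc (by omega) hi (by omega)]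
        set r := pvInnerA tracks m t.1 tracks.length i t.2 (t.2 - t.1) with hr
        simp only [pvInnerCont]
        by_cases hdur : r.2.2 < m
        · have hend : tracks.length ≤ r.1 + 1 := by
            rw [hr]
            exact pvInnerA_exit tracks m t.1 tracks.length i t.2 (t.2 - t.1) (by omega)
              (by rw [← hr]; exact hdur)
          rw [if_pos hdur]
          by_cases hacc : acc ≠ []
          · rw [if_pos ⟨hdur, hacc⟩, if_pos hacc]
            cases k with
            | zero => rfl
            | succ k' => rw [pvOuterA_succ, if_neg (show ¬ r.1 + 1 < tracks.length by omega)]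
          · rw [if_neg (by tauto : ¬ (r.2.2 < m ∧ acc ≠ [])), if_neg hacc]
            cases k with
            | zero => rfl
            | succ k' => rw [pvOuterA_succ, if_neg (show ¬ r.1 + 1 < tracks.length by omega)]
        · have hge : i ≤ r.1 := by rw [hr]; exact pvInnerA_ge tracks m t.1 tracks.length i t.2 (t.2 - t.1)
          rw [if_neg hdur, if_neg (by tauto : ¬ (r.2.2 < m ∧ acc ≠ []))]
          exact ih (r.1+1) (acc ++ [(t.1, r.2.1)]) (by omega)
    · rw [pvOuterA_succ, if_neg hi, List.drop_eq_nil_of_le (by omega), pvGoB_nil_none]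

-- ————— bridge from the flat pass to B's staged passes —————

-- the enumerated suffix starting at position p
def pvE (tracks : List (Int × Int)) (p : Nat) : List (Int × (Int × Int)) :=
  (PySem.List.enumerate tracks).drop p

-- B's stage-3 fix-up as a function (definitional tail of consolidate_short_tracks_alt)
def pvFix (segs : List (Int × Int)) (s : Option Int) : List (Int × Int) :=
  if s ≠ none ∧ segs.length ≥ 2 then
    segs.take (segs.length - 2) ++
      [((PySem.List.pyGetD segs (-2) (0,0)).1, (PySem.List.pyGetD segs (-1) (0,0)).2)]
  else segs

-- what the flat pass is claimed to produce mid-scan, phrased with B's stages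
def pvStateOut (tracks : List (Int × Int)) (m : Int) (p : Nat)
    (acc : List (Int × Int)) : Option Int → List (Int × Int)
  | none =>
      pvFix (acc ++ pvSegsB tracks (pvCutsB m (pvE tracks p) [] none).1)
        (pvCutsB m (pvE tracks p) [] none).2
  | some sv =>
      pvFix (acc ++ (sv, (PySem.List.pyGetD tracks
          (((pvCutsB m (pvE tracks p) [] (some sv)).1 ++ [(tracks.length : Int)]).headD 0 - 1)
          (0,0)).2) :: pvSegsB tracks (pvCutsB m (pvE tracks p) [] (some sv)).1)
        (pvCutsB m (pvE tracks p) [] (some sv)).2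

theorem pvStateOut_none (tracks : List (Int × Int)) (m : Int) (p : Nat)
    (acc : List (Int × Int)) :
    pvStateOut tracks m p acc none =
      pvFix (acc ++ pvSegsB tracks (pvCutsB m (pvE tracks p) [] none).1)
        (pvCutsB m (pvE tracks p) [] none).2 := rfl

theorem pvStateOut_some (tracks : List (Int × Int)) (m : Int) (p : Nat)
    (acc : List (Int × Int)) (sv : Int) :
    pvStateOut tracks m p acc (some sv) =
      pvFix (acc ++ (sv, (PySem.List.pyGetD tracks
          (((pvCutsB m (pvE tracks p) [] (some sv)).1 ++ [(tracks.length : Int)]).headD 0 - 1)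
          (0,0)).2) :: pvSegsB tracks (pvCutsB m (pvE tracks p) [] (some sv)).1)
        (pvCutsB m (pvE tracks p) [] (some sv)).2 := rfl

theorem pvE_nil (tracks : List (Int × Int)) (p : Nat) (h : tracks.length ≤ p) :
    pvE tracks p = [] := by
  unfold pvE
  rw [List.drop_eq_nil_of_le]
  simpa using h

theorem pvE_cons (tracks : List (Int × Int)) (p : Nat) (h : p < tracks.length) :
    pvE tracks p = ((p : Int), tracks.getD p (0,0)) :: pvE tracks (p+1) := by
  unfold pvE
  have hlen : p < (PySem.List.enumerate tracks).length := by
    simpa [PySem.List.length_enumerate] using h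
  rw [List.drop_eq_getElem_cons hlen]
  congr 1
  rw [PySem.List.getElem_enumerate]
  simp [List.getD_eq_getElem?_getD, List.getElem?_eq_getElem h]

-- accumulated cuts are a pure prefix
theorem pvCutsB_acc (m : Int) :
    ∀ (l : List (Int × (Int × Int))) (cs : List Int) (s : Option Int),
      pvCutsB m l cs s = (cs ++ (pvCutsB m l [] s).1, (pvCutsB m l [] s).2) := by
  intro l
  induction l with
  | nil => intro cs s; simp [pvCutsB]
  | cons jt rest ih =>
    intro cs s
    obtain ⟨j, t⟩ := jt
    cases s with
    | none =>
      have h1 : pvCutsB m ((j,t)::rest) cs none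
          = pvCutsB m rest (cs ++ [j]) (if t.2 - t.1 ≥ m then none else some t.1) := rfl
      have h2 : pvCutsB m ((j,t)::rest) [] none
          = pvCutsB m rest [j] (if t.2 - t.1 ≥ m then none else some t.1) := rfl
      rw [h1, h2, ih (cs ++ [j]), ih [j]]
      simp
    | some sv =>
      have h1 : pvCutsB m ((j,t)::rest) cs (some sv)
          = pvCutsB m rest cs (if t.2 - sv ≥ m then none else some sv) := rfl
      have h2 : pvCutsB m ((j,t)::rest) [] (some sv)
          = pvCutsB m rest [] (if t.2 - sv ≥ m then none else some sv) := rfl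
      rw [h1, h2, ih cs]

-- the first cut produced from a closed state at position q is q itself (or none)
theorem pvCutsB_head (tracks : List (Int × Int)) (m : Int) (q : Nat) (hq : q < tracks.length) :
    ((pvCutsB m (pvE tracks q) [] none).1 ++ [(tracks.length : Int)]).headD 0 = (q : Int) := by
  rw [pvE_cons tracks q hq]
  show ((pvCutsB m (pvE tracks (q+1)) [(q : Int)] _).1 ++ _).headD 0 = (q : Int)
  rw [pvCutsB_acc]
  simp

theorem pvCutsB_head_end (tracks : List (Int × Int)) (m : Int) (q : Nat)
    (hq : tracks.length ≤ q) :
    ((pvCutsB m (pvE tracks q) [] none).1 ++ [(tracks.length : Int)]).headD 0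
      = (tracks.length : Int) := by
  rw [pvE_nil tracks q hq]
  simp [pvCutsB]

-- stage-2 unfolding: one segment per leading cut
theorem pvSegsB_cons (tracks : List (Int × Int)) (c : Int) (rest : List Int) :
    pvSegsB tracks (c :: rest) =
      ((PySem.List.pyGetD tracks c (0,0)).1,
       (PySem.List.pyGetD tracks ((rest ++ [(tracks.length : Int)]).headD 0 - 1) (0,0)).2)
        :: pvSegsB tracks rest := by
  cases rest with
  | nil => simp [pvSegsB]
  | cons r rs => simp [pvSegsB]

-- the fix-up over acc ++ [one open segment] is exactly the flat pass's cleanup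
theorem pvFix_append_some (acc : List (Int × Int)) (x : Int × Int) (sv : Int) :
    pvFix (acc ++ [x]) (some sv) =
      if acc ≠ [] then acc.dropLast ++ [((acc.getLastD (0,0)).1, x.2)] else acc ++ [x] := by
  by_cases hacc : acc = []
  · subst hacc
    simp [pvFix]
  · rw [if_pos hacc]
    have hlen : 0 < acc.length := List.length_pos_iff.mpr hacc
    unfold pvFix
    rw [if_pos ⟨by simp, by simp; omega⟩]
    have hL : (acc ++ [x]).length = acc.length + 1 := by simp
    have hg2 : PySem.List.pyGetD (acc ++ [x]) (-2) (0,0) = acc.getLastD (0,0) := by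
      rw [PySem.List.pyGetD_neg_ofNat _ 2 _ (by omega) (by simp; omega)]
      have hidx : (acc ++ [x]).length - 2 = acc.length - 1 := by simp
      rw [List.getElem_append_left (by omega)]
      rcases List.exists_cons_of_ne_nil hacc with ⟨a, as, rfl⟩
      rw [List.getLastD_eq_getLast?, List.getLast?_eq_getElem?]
      simp only [hidx]
      rw [List.getElem?_eq_getElem (by omega)]
      rfl
    have hg1 : PySem.List.pyGetD (acc ++ [x]) (-1) (0,0) = x := by
      rw [PySem.List.pyGetD_neg_ofNat _ 1 _ (by omega) (by simp)]
      simp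
    rw [hg2, hg1]
    congr 1
    rw [hL]
    have : acc.length + 1 - 2 = acc.length - 1 := by omega
    rw [this, List.take_append_of_le_length (by omega), List.dropLast_eq_take]

-- head of the cut list produced from a closed state at p+1, p in range
theorem pvCutsB_head' (tracks : List (Int × Int)) (m : Int) (p : Nat)
    (hp : p < tracks.length) :
    ((pvCutsB m (pvE tracks (p+1)) [] none).1 ++ [(tracks.length : Int)]).headD 0
      = (p : Int) + 1 := by
  by_cases hq : p + 1 < tracks.length
  · rw [pvCutsB_head tracks m (p+1) hq]
    push_cast
    ring
  · rw [pvCutsB_head_end tracks m (p+1) (by omega)]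
    have h : tracks.length = p + 1 := by omega
    rw [h]
    push_cast
    ring

-- the flat pass at the end of the scan (p beyond the list)
theorem goB_state_end (tracks : List (Int × Int)) (m : Int) (p : Nat)
    (acc : List (Int × Int)) (s : Option Int) (hp : tracks.length ≤ p)
    (hs : ∀ sv, s = some sv → 1 ≤ p ∧ p ≤ tracks.length ∧ (tracks.getD (p-1) (0,0)).2 - sv < m) :
    pvGoB m (tracks.drop p) (s.map (fun sv => (sv, (tracks.getD (p-1) (0,0)).2))) acc
      = pvStateOut tracks m p acc s := by
  have hdrop : tracks.drop p = [] := List.drop_eq_nil_of_le hp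
  have hE : pvE tracks p = [] := pvE_nil tracks p hp
  cases s with
  | none =>
    rw [hdrop]
    show pvGoB m [] none acc = _
    rw [pvGoB_nil_none, pvStateOut_none, hE]
    show acc = pvFix (acc ++ pvSegsB tracks []) none
    simp [pvSegsB, pvFix]
  | some sv =>
    obtain ⟨h1, h2, _⟩ := hs sv rfl
    have hpl : p = tracks.length := le_antisymm h2 hp
    rw [hdrop]
    show pvGoB m [] (some (sv, (tracks.getD (p-1) (0,0)).2)) acc = _
    rw [pvGoB_nil_some, pvStateOut_some, hE]
    show _ = pvFix (acc ++ [(sv, (PySem.List.pyGetD tracks ((tracks.length : Int) - 1) (0,0)).2)]) (some sv)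
    have hidx : (tracks.length : Int) - 1 = ((p - 1 : Nat) : Int) := by omega
    rw [hidx, PySem.List.pyGetD_natCast, pvFix_append_some]

-- main bridge: the flat pass mid-scan equals B's staged computation
theorem goB_state (tracks : List (Int × Int)) (m : Int) :
    ∀ (k p : Nat) (acc : List (Int × Int)) (s : Option Int),
      tracks.length - p ≤ k →
      (∀ sv, s = some sv → 1 ≤ p ∧ p ≤ tracks.length ∧ (tracks.getD (p-1) (0,0)).2 - sv < m) →
      pvGoB m (tracks.drop p) (s.map (fun sv => (sv, (tracks.getD (p-1) (0,0)).2))) acc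
        = pvStateOut tracks m p acc s := by
  intro k
  induction k with
  | zero =>
    intro p acc s hk hs
    exact goB_state_end tracks m p acc s (by omega) hs
  | succ k ih =>
    intro p acc s hk hs
    by_cases hp : p < tracks.length
    · have hdrop : tracks.drop p = tracks.getD p (0,0) :: tracks.drop (p+1) := by
        rw [List.getD_eq_getElem _ _ hp, List.drop_eq_getElem_cons hp]
      have hEc := pvE_cons tracks p hp
      set t := tracks.getD p (0,0) with ht
      have hhead := pvCutsB_head' tracks m p hp
      have hseg1 : (PySem.List.pyGetD tracks
          (((pvCutsB m (pvE tracks (p+1)) [] none).1 ++ [(tracks.length : Int)]).headD 0 - 1)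
          (0,0)).2 = t.2 := by
        rw [hhead]
        have : (p : Int) + 1 - 1 = ((p : Nat) : Int) := by ring
        rw [this, PySem.List.pyGetD_natCast]
      cases s with
      | none =>
        rw [hdrop]
        show pvGoB m (t :: tracks.drop (p+1)) none acc = _
        rw [pvGoB_cons_none, pvStateOut_none, hEc]
        have hstep : pvCutsB m (((p : Int), t) :: pvE tracks (p+1)) [] none
            = pvCutsB m (pvE tracks (p+1)) [(p : Int)]
                (if t.2 - t.1 ≥ m then none else some t.1) := rfl
        rw [hstep]
        by_cases hlong : t.2 - t.1 ≥ m
        · rw [if_pos hlong, if_pos hlong, pvCutsB_acc]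
          simp only [List.singleton_append]
          rw [pvSegsB_cons, hseg1]
          have hfirst : (PySem.List.pyGetD tracks ((p : Int)) (0,0)).1 = t.1 := by
            rw [PySem.List.pyGetD_natCast]
          rw [hfirst]
          have ihe := ih (p+1) (acc ++ [(t.1, t.2)]) none (by omega) (by simp)
          simp only [Option.map_none] at ihe
          rw [ihe, pvStateOut_none]
          simp [List.append_assoc]
        · rw [if_neg hlong, if_neg hlong, pvCutsB_acc]
          simp only [List.singleton_append]
          rw [pvSegsB_cons]
          have hfirst : (PySem.List.pyGetD tracks ((p : Int)) (0,0)).1 = t.1 := by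
            rw [PySem.List.pyGetD_natCast]
          rw [hfirst]
          have ihe := ih (p+1) acc (some t.1) (by omega)
            (by intro sv hsv; injection hsv with hsv; subst hsv
                refine ⟨by omega, by omega, ?_⟩
                simpa using (by omega : t.2 - t.1 < m))
          simp only [Option.map_some] at ihe
          have hmid : tracks.getD (p+1-1) (0,0) = t := by simp [ht]
          rw [hmid] at ihe
          rw [ihe, pvStateOut_some]
      | some sv =>
        obtain ⟨hl1, hl2, hl3⟩ := hs sv rfl
        rw [hdrop]
        show pvGoB m (t :: tracks.drop (p+1)) (some (sv, (tracks.getD (p-1) (0,0)).2)) acc = _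
        rw [pvGoB_cons_some, pvStateOut_some, hEc]
        have hstep : pvCutsB m (((p : Int), t) :: pvE tracks (p+1)) [] (some sv)
            = pvCutsB m (pvE tracks (p+1)) []
                (if t.2 - sv ≥ m then none else some sv) := rfl
        rw [hstep]
        by_cases hcl : t.2 - sv ≥ m
        · rw [if_pos hcl, if_pos hcl, hseg1]
          have ihe := ih (p+1) (acc ++ [(sv, t.2)]) none (by omega) (by simp)
          simp only [Option.map_none] at ihe
          rw [ihe, pvStateOut_none]
          simp [List.append_assoc]
        · rw [if_neg hcl, if_neg hcl]
          have ihe := ih (p+1) acc (some sv) (by omega)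
            (by intro sv' hsv; injection hsv with hsv; subst hsv
                refine ⟨by omega, by omega, ?_⟩
                simpa [ht] using (by omega : t.2 - sv < m))
          simp only [Option.map_some] at ihe
          have hmid : tracks.getD (p+1-1) (0,0) = t := by simp [ht]
          rw [hmid] at ihe
          rw [ihe, pvStateOut_some]
    · exact goB_state_end tracks m p acc s (by omega) hs

-- B itself is the staged computation at the start state
theorem alt_eq_state (tracks : List (Int × Int)) (m : Int) :
    consolidate_short_tracks_alt tracks m = pvStateOut tracks m 0 [] none := by
  rw [pvStateOut_none]
  unfold consolidate_short_tracks_alt pvFix pvE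
  simp

-- ===== VERDICT (by name: the statement is the Claim_ definition above) =====
theorem consolidate_short_tracks_spec : Claim_equal_consolidate_short_tracks := by
  intro tracks m _
  unfold Spec_consolidate_short_tracks consolidate_short_tracks
  rw [outer_eq_goB tracks m tracks.length 0 [] (by omega), alt_eq_state]
  have := goB_state tracks m tracks.length 0 [] none (by omega) (by simp)
  simpa using this
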